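-- pv_equiv track=rewrite | github.com/jcolinpatrick/kryptos | scripts/e_route_definitive.py | gen_snake_column
-- ===== SOURCE A (Python) =====
-- def read_order_to_perm(grid, nrows, ncols, cell_order):
--     """Convert a reading order to a permutation (output[i] = input[perm[i]])."""
--     perm = []
--     for r, c in cell_order:
--         if 0 <= r < nrows and 0 <= c < ncols:
--             val = grid[r][c]
--             if val >= 0:
--                 perm.append(val)
--     return perm
--
-- def gen_snake_column(grid, nrows, width, reverse_start=False):
--     """Column-serpentine: columns alternating T→B/B→T."""
--     order = []
--     for c in range(width):
--         even = (c % 2 == 0) if not reverse_start else (c % 2 == 1)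
--         if even:
--             for r in range(nrows): order.append((r, c))
--         else:
--             for r in range(nrows - 1, -1, -1): order.append((r, c))
--     return read_order_to_perm(grid, nrows, width, order)
-- ===== SOURCE B (Python) =====
-- def gen_snake_column(grid, nrows, width, reverse_start=False):
--     """Column-serpentine: columns alternating T->B/B->T."""
--     perm = []
--     for c in range(width):
--         col = [grid[r][c] for r in range(nrows) if grid[r][c] >= 0]
--         top_down = (c % 2 == 0) != reverse_start
--         perm.extend(col if top_down else col[::-1])
--     return perm
-- ===== Notes on version B (the rewrite author's own statement) =====
-- stated objective: simpler
-- what changed: Drops the intermediate (row,col) order list, the helper function and its dead bounds check: each column's surviving values are collected directly with one comprehension and reversed in place for bottom-to-top columns.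
import Mathlib
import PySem

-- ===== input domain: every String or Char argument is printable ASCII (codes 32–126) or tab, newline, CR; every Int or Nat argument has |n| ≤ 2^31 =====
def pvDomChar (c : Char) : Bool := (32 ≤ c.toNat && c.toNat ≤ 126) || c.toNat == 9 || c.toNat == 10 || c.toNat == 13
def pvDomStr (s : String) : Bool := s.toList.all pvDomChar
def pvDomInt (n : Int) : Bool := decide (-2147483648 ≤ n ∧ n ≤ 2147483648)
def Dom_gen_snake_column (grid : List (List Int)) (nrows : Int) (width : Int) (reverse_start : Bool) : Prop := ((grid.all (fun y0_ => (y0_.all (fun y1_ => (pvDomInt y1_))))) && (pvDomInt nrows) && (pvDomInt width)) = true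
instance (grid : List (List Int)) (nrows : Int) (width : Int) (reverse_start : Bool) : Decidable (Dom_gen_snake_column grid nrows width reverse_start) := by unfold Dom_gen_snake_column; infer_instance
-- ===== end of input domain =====

-- B drops the intermediate (row,col) order list, the helper and its dead bounds check,
-- collecting each column's surviving values directly and reversing bottom-to-top columns (objective: simpler).


-- ===== PORT A =====
def read_order_to_perm (grid : List (List Int)) (nrows : Int) (ncols : Int)
    (cell_order : List (Int × Int)) : List Int :=
  cell_order.foldl (fun perm rc =>
    if 0 ≤ rc.1 ∧ rc.1 < nrows ∧ 0 ≤ rc.2 ∧ rc.2 < ncols then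
      if 0 ≤ PySem.List.pyGetD (PySem.List.pyGetD grid rc.1 []) rc.2 0 then
        perm ++ [PySem.List.pyGetD (PySem.List.pyGetD grid rc.1 []) rc.2 0]
      else perm
    else perm) []

def gen_snake_column (grid : List (List Int)) (nrows : Int) (width : Int) (reverse_start : Bool) : List Int :=
  let order := (PySem.List.pyRange 0 width 1).foldl (fun order c =>
    let even := if !reverse_start then PySem.Int.mod c 2 == 0 else PySem.Int.mod c 2 == 1
    if even then (PySem.List.pyRange 0 nrows 1).foldl (fun o r => o ++ [(r, c)]) order
    else (PySem.List.pyRange (nrows - 1) (-1) (-1)).foldl (fun o r => o ++ [(r, c)]) order) []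
  read_order_to_perm grid nrows width order

-- ===== PORT B =====
def gen_snake_column_alt (grid : List (List Int)) (nrows : Int) (width : Int) (reverse_start : Bool) : List Int :=
  (PySem.List.pyRange 0 width 1).foldl (fun perm c =>
    let col := ((PySem.List.pyRange 0 nrows 1).filter
        (fun r => decide (0 ≤ PySem.List.pyGetD (PySem.List.pyGetD grid r []) c 0))).map
        (fun r => PySem.List.pyGetD (PySem.List.pyGetD grid r []) c 0)
    let top_down := (PySem.Int.mod c 2 == 0) != reverse_start
    perm ++ (if top_down then col else col.reverse)) []

-- ===== PRECONDITION & SPEC =====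
-- Pre_ excludes exactly the inputs on which Python A raises IndexError: a visited cell
-- (r < nrows, c < width, both positive counts) outside the actual grid.
def Pre_gen_snake_column (grid : List (List Int)) (nrows : Int) (width : Int) (reverse_start : Bool) : Prop :=
  0 < nrows → 0 < width →
    (nrows ≤ (grid.length : Int) ∧ ∀ row ∈ grid.take nrows.toNat, width ≤ (row.length : Int))
instance (grid : List (List Int)) (nrows : Int) (width : Int) (reverse_start : Bool) : Decidable (Pre_gen_snake_column grid nrows width reverse_start) := by unfold Pre_gen_snake_column; infer_instance

def pvWitness_gen_snake_column : List (List Int) × Int × Int × Bool := ([[0, 1], [2, 3]], 2, 2, false)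

def Spec_gen_snake_column (grid : List (List Int)) (nrows : Int) (width : Int) (reverse_start : Bool) (out : List Int) : Prop := out = gen_snake_column_alt grid nrows width reverse_start
instance (grid : List (List Int)) (nrows : Int) (width : Int) (reverse_start : Bool) (out : List Int) : Decidable (Spec_gen_snake_column grid nrows width reverse_start out) := by unfold Spec_gen_snake_column; infer_instance

-- ===== CLAIM (what is proved, stated in full; the proofs are below) =====
def Claim_equal_gen_snake_column : Prop := ∀ (grid : List (List Int)) (nrows : Int) (width : Int) (reverse_start : Bool), Dom_gen_snake_column grid nrows width reverse_start → Pre_gen_snake_column grid nrows width reverse_start → Spec_gen_snake_column grid nrows width reverse_start (gen_snake_column grid nrows width reverse_start)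

-- ===== LEMMAS AND PROOFS =====
-- the cell value both programs read: grid[r][c] (totalised; Pre_ keeps it in range on visited cells)
def pvG (grid : List (List Int)) (r c : Int) : Int :=
  PySem.List.pyGetD (PySem.List.pyGetD grid r []) c 0

theorem pv_flatMap_congr_mem {α β : Type} {l : List α} {f g : α → List β}
    (h : ∀ x ∈ l, f x = g x) : l.flatMap f = l.flatMap g := by
  induction l with
  | nil => rfl
  | cons a t ih => simp only [List.flatMap_cons]; rw [h a (by simp), ih (fun x hx => h x (by simp [hx]))]

-- closed form of A's helper
theorem pv_ro_closed (grid : List (List Int)) (nrows ncols : Int) (os : List (Int × Int)) :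
    read_order_to_perm grid nrows ncols os =
      (os.filter (fun rc =>
        decide ((0 ≤ rc.1 ∧ rc.1 < nrows ∧ 0 ≤ rc.2 ∧ rc.2 < ncols) ∧ 0 ≤ pvG grid rc.1 rc.2))).map
        (fun rc => pvG grid rc.1 rc.2) := by
  unfold read_order_to_perm
  have hcong : os.foldl (fun perm rc =>
      if 0 ≤ rc.1 ∧ rc.1 < nrows ∧ 0 ≤ rc.2 ∧ rc.2 < ncols then
        if 0 ≤ PySem.List.pyGetD (PySem.List.pyGetD grid rc.1 []) rc.2 0 then
          perm ++ [PySem.List.pyGetD (PySem.List.pyGetD grid rc.1 []) rc.2 0]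
        else perm
      else perm) [] =
    os.foldl (fun perm rc =>
      if (0 ≤ rc.1 ∧ rc.1 < nrows ∧ 0 ≤ rc.2 ∧ rc.2 < ncols) ∧ 0 ≤ pvG grid rc.1 rc.2 then
        perm ++ [pvG grid rc.1 rc.2] else perm) [] := by
    refine PySem.List.foldl_congr_mem _ _ _ _ (fun acc rc _ => ?_)
    unfold pvG; split_ifs <;> tauto
  rw [hcong, PySem.List.foldl_append_ite, List.nil_append]

-- A as a flatMap over columns
theorem pv_A_closed (grid : List (List Int)) (nrows width : Int) (reverse_start : Bool) :
    gen_snake_column grid nrows width reverse_start =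
      read_order_to_perm grid nrows width
        ((PySem.List.pyRange 0 width 1).flatMap (fun c =>
          if (if !reverse_start then PySem.Int.mod c 2 == 0 else PySem.Int.mod c 2 == 1) then
            (PySem.List.pyRange 0 nrows 1).map (fun r => (r, c))
          else (PySem.List.pyRange (nrows - 1) (-1) (-1)).map (fun r => (r, c)))) := by
  unfold gen_snake_column
  show read_order_to_perm _ _ _ _ = _
  have h1 : ((PySem.List.pyRange 0 width 1).foldl (fun order c =>
      let even := if !reverse_start then PySem.Int.mod c 2 == 0 else PySem.Int.mod c 2 == 1
      if even then (PySem.List.pyRange 0 nrows 1).foldl (fun o r => o ++ [(r, c)]) order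
      else (PySem.List.pyRange (nrows - 1) (-1) (-1)).foldl (fun o r => o ++ [(r, c)]) order) []) =
    ((PySem.List.pyRange 0 width 1).foldl (fun order c =>
      order ++ (if (if !reverse_start then PySem.Int.mod c 2 == 0 else PySem.Int.mod c 2 == 1) then
        (PySem.List.pyRange 0 nrows 1).map (fun r => (r, c))
      else (PySem.List.pyRange (nrows - 1) (-1) (-1)).map (fun r => (r, c)))) []) := by
    refine PySem.List.foldl_congr_mem _ _ _ _ (fun acc c _ => ?_)
    simp only [PySem.List.foldl_append_singleton_eq_map]
    split <;> split <;> rfl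
  rw [h1, PySem.List.foldl_append_eq_flatMap, List.nil_append]

-- B as a flatMap over columns
theorem pv_B_closed (grid : List (List Int)) (nrows width : Int) (reverse_start : Bool) :
    gen_snake_column_alt grid nrows width reverse_start =
      (PySem.List.pyRange 0 width 1).flatMap (fun c =>
        if ((PySem.Int.mod c 2 == 0) != reverse_start) then
          ((PySem.List.pyRange 0 nrows 1).filter (fun r => decide (0 ≤ pvG grid r c))).map
            (fun r => pvG grid r c)
        else (((PySem.List.pyRange 0 nrows 1).filter (fun r => decide (0 ≤ pvG grid r c))).map
            (fun r => pvG grid r c)).reverse) := by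
  unfold gen_snake_column_alt
  rw [PySem.List.foldl_append_eq_flatMap, List.nil_append]
  refine pv_flatMap_congr_mem (fun c _ => ?_)
  unfold pvG
  split <;> simp

-- parity flags agree on nonnegative columns
theorem pv_parity (c : Int) (reverse_start : Bool) :
    (if !reverse_start then PySem.Int.mod c 2 == 0 else PySem.Int.mod c 2 == 1) =
    ((PySem.Int.mod c 2 == 0) != reverse_start) := by
  rcases PySem.Int.mod_two_eq c with h | h <;> cases reverse_start <;> rw [h] <;> simp

-- the downward row range is the reverse of the upward one
theorem pv_range_rev (nrows : Int) :
    PySem.List.pyRange (nrows - 1) (-1) (-1) = (PySem.List.pyRange 0 nrows 1).reverse := by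
  have h := PySem.List.pyRange_neg_one_eq_reverse (nrows - 1) (-1)
  simpa using h

theorem gen_snake_column_spec_aux (grid : List (List Int)) (nrows width : Int) (reverse_start : Bool) :
    gen_snake_column grid nrows width reverse_start = gen_snake_column_alt grid nrows width reverse_start := by
  rw [pv_A_closed, pv_ro_closed, pv_B_closed, List.filter_flatMap, List.map_flatMap]
  refine pv_flatMap_congr_mem (fun c hc => ?_)
  have hcm : 0 ≤ c ∧ c < width := (PySem.List.mem_pyRange_one).1 hc
  rw [pv_parity]
  split
  · -- top-down column
    rw [List.filter_map, List.map_map]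
    refine congrArg _ ?_
    refine List.filter_congr (fun r hr => ?_)
    have hrm : 0 ≤ r ∧ r < nrows := (PySem.List.mem_pyRange_one).1 hr
    simp only [Function.comp]
    exact decide_eq_decide.mpr ⟨fun h => h.2, fun h => ⟨⟨hrm.1, hrm.2, hcm.1, hcm.2⟩, h⟩⟩
  · -- bottom-up column
    rw [pv_range_rev, List.map_reverse, List.filter_reverse, List.map_reverse, List.filter_map, List.map_map]
    refine congrArg _ ?_
    refine congrArg _ ?_
    refine List.filter_congr (fun r hr => ?_)
    have hrm : 0 ≤ r ∧ r < nrows := (PySem.List.mem_pyRange_one).1 hr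
    simp only [Function.comp]
    exact decide_eq_decide.mpr ⟨fun h => h.2, fun h => ⟨⟨hrm.1, hrm.2, hcm.1, hcm.2⟩, h⟩⟩

-- ===== VERDICT (by name: the statement is the Claim_ definition above) =====
theorem gen_snake_column_spec : Claim_equal_gen_snake_column := by
  intro grid nrows width reverse_start _ _
  unfold Spec_gen_snake_column
  exact gen_snake_column_spec_aux grid nrows width reverse_start
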